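-- pv_equiv track=rewrite | github.com/zachklaus/my-projects | Python Projects/RSA/transposition-encr.py | add_x
-- ===== SOURCE A (Python) =====
-- def add_x(plaintext):
--
--     new_plaintext = ""
--
--     for char in plaintext:
--         if char is  ' ':
--             new_plaintext = new_plaintext + "XX"
--         elif char is '.':
--             break
--         else:
--             new_plaintext = new_plaintext + char
--
--     while True:
--         if (len(new_plaintext) % 10) != 0:
--             new_plaintext = new_plaintext + 'X'
--         else:
--             break
--
--     return new_plaintext
-- ===== SOURCE B (Python) =====
-- def add_x(plaintext):
--     s = plaintext.split('.')[0].replace(' ', 'XX')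
--     return s + 'X' * ((10 - len(s) % 10) % 10)
-- ===== Notes on version B (the rewrite author's own statement) =====
-- stated objective: simpler
-- what changed: Replaces the character-by-character accumulation loop with whole-string split/replace, and the one-at-a-time while-loop padding with a closed-form modulo count of pad characters.
import Mathlib
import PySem

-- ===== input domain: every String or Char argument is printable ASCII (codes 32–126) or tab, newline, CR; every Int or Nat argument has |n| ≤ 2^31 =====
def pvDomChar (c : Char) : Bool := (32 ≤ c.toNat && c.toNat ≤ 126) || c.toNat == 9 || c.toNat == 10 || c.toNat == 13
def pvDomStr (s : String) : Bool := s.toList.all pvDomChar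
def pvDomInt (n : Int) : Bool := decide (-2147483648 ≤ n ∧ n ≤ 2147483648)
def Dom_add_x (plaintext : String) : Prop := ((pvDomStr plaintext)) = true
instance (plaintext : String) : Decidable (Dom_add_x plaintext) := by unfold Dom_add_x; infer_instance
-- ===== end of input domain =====

-- B: split/replace plus a closed-form pad count instead of A's char-by-char loop and one-at-a-time padding while-loop (objective: simpler).

-- ===== PORT A =====
-- for char in plaintext: space → "XX", '.' → break, else append char
def addxLoopA : List Char → List Char → List Char
  | acc, [] => acc
  | acc, c :: rest =>
    if c = ' ' then addxLoopA (acc ++ ['X', 'X']) rest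
    else if c = '.' then acc
    else addxLoopA (acc ++ [c]) rest

-- while len % 10 != 0: append 'X'
def addxPadA (l : List Char) : List Char :=
  if l.length % 10 ≠ 0 then addxPadA (l ++ ['X']) else l
termination_by (10 - l.length % 10) % 10
decreasing_by
  rename_i h
  simp only [List.length_append, List.length_cons, List.length_nil]
  omega

def add_x (plaintext : String) : String :=
  String.mk (addxPadA (addxLoopA [] plaintext.toList))

-- ===== PORT B =====
-- plaintext.split('.')[0] for a single-char separator = takeWhile (· ≠ '.');
-- .replace(' ', 'XX') = flatMap; 'X' * k = List.replicate k 'X'  (each exact on this domain)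
def addxExpand (c : Char) : List Char := if c = ' ' then ['X', 'X'] else [c]

def add_x_alt (plaintext : String) : String :=
  let s := (plaintext.toList.takeWhile (· ≠ '.')).flatMap addxExpand
  String.mk (s ++ List.replicate ((10 - s.length % 10) % 10) 'X')

-- ===== PRECONDITION & SPEC =====
def Spec_add_x (plaintext : String) (out : String) : Prop := out = add_x_alt plaintext
instance (plaintext : String) (out : String) : Decidable (Spec_add_x plaintext out) := by unfold Spec_add_x; infer_instance

-- ===== CLAIM (what is proved, stated in full; the proofs are below) =====
def Claim_equal_add_x : Prop := ∀ (plaintext : String), Dom_add_x plaintext → Spec_add_x plaintext (add_x plaintext)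

-- ===== LEMMAS AND PROOFS =====
theorem addxLoopA_eq (l acc : List Char) :
    addxLoopA acc l = acc ++ (l.takeWhile (· ≠ '.')).flatMap addxExpand := by
  induction l generalizing acc with
  | nil => simp [addxLoopA]
  | cons c rest ih =>
    by_cases hs : c = ' '
    · subst hs
      simp [addxLoopA, List.takeWhile, addxExpand, ih]
    · by_cases hd : c = '.'
      · subst hd; simp [addxLoopA, List.takeWhile]
      · simp [addxLoopA, hs, hd, List.takeWhile, addxExpand, ih]

theorem addxPadA_eq (l : List Char) :
    addxPadA l = l ++ List.replicate ((10 - l.length % 10) % 10) 'X' := by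
  fun_induction addxPadA l with
  | case1 l h ih =>
    rw [ih]
    have : (10 - (l ++ ['X']).length % 10) % 10 + 1 = (10 - l.length % 10) % 10 := by
      simp only [List.length_append, List.length_cons, List.length_nil]
      omega
    rw [List.append_assoc, ← this, List.replicate_succ]
    simp
  | case2 l h =>
    simp at h
    simp [h]

-- ===== VERDICT (by name: the statement is the Claim_ definition above) =====
theorem add_x_spec : Claim_equal_add_x := by
  intro p _
  unfold Spec_add_x add_x add_x_alt
  rw [addxLoopA_eq, addxPadA_eq]
  simp
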